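-- pv_equiv track=rewrite | github.com/yakra13/cliecho | core/output_formatter.py | to_column_major
-- ===== SOURCE A (Python) =====
-- import math
-- from typing import Dict, Tuple, Any, Optional, List
--
-- def to_column_major(items: List[str], columns: int) -> List[str]:
--     if not items or columns <= 0:
--         return items
--
--     rows = math.ceil(len(items) / columns)
--
--     grid: List[List[Optional[str]]] = [[None] * columns for _ in range(rows)]
--
--     # Fill column-major
--     idx = 0
--     for c in range(columns):
--         for r in range(rows):
--             if idx < len(items):
--                 grid[r][c] = items[idx]
--                 idx += 1
--
--     result: List[str] = []
--     for row in grid: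
--         for item in row:
--             result.append(item if item is not None else '')
--
--
--     # for r in range(rows):
--     #     for c in range(columns):
--     #         idx = c * rows + r
--     #         if idx < len(items):
--     #             result.append(items[idx])
--
--     return result
-- ===== SOURCE B (Python) =====
-- import math
--
-- def to_column_major(items, columns):
--     if not items or columns <= 0:
--         return items
--     n = len(items)
--     rows = math.ceil(n / columns)
--     return [items[c * rows + r] if c * rows + r < n else ''
--             for r in range(rows) for c in range(columns)]
-- ===== Notes on version B (the rewrite author's own statement) =====
-- stated objective: simpler
-- what changed: B drops A's mutable Optional-cell grid (column-major fill loop, then row-major flatten with None->'' patching) and emits the result directly with one row-major comprehension whose source index c*rows+r is computed arithmetically, padding with '' past the end.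
import Mathlib
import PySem

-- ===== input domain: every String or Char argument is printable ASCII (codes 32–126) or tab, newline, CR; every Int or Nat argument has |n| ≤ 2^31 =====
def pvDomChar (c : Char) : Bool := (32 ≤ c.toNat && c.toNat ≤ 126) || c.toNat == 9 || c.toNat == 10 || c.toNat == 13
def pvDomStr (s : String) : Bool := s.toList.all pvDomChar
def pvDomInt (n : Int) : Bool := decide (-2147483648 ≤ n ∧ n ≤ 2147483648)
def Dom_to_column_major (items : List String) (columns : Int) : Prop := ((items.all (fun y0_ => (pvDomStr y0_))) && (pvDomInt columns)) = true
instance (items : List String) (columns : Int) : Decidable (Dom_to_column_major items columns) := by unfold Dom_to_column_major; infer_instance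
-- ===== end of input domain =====

-- B replaces A's materialized Optional-grid (column-major fill then row-major flatten) by one
-- row-major comprehension computing each source index arithmetically; objective: simpler.

-- ===== PORT A =====
-- grid[r][c] = v  on a list of lists (every use has r, c in range)
def gridSet (g : List (List (Option String))) (r c : Nat) (v : Option String) :
    List (List (Option String)) :=
  g.set r ((g.getD r []).set c v)

def to_column_major (items : List String) (columns : Int) : List String :=
  if items = [] ∨ columns ≤ 0 then items
  else
    -- math.ceil(len(items)/columns): exact ceiling division at these magnitudes
    let rows : Int := -(PySem.Int.floordiv (-(items.length : Int)) columns)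
    -- [[None] * columns for _ in range(rows)]  (columns > 0 here, so .toNat is exact)
    let grid : List (List (Option String)) :=
      (PySem.List.pyRange 0 rows).map (fun _ => List.replicate columns.toNat none)
    -- column-major fill; state = (grid, idx); loop indices are ≥ 0, so .toNat is exact
    let st :=
      (PySem.List.pyRange 0 columns).foldl (fun st c =>
        (PySem.List.pyRange 0 rows).foldl
          (fun (st : List (List (Option String)) × Nat) r =>
            if st.2 < items.length then
              (gridSet st.1 r.toNat c.toNat (some (items.getD st.2 "")), st.2 + 1)
            else st) st) (grid, 0)
    -- row-major flatten, None → ''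
    st.1.foldl (fun result row =>
      row.foldl (fun result item => result ++ [item.getD ""]) result) []

-- ===== PORT B =====
def to_column_major_alt (items : List String) (columns : Int) : List String :=
  if items = [] ∨ columns ≤ 0 then items
  else
    let n : Int := items.length
    let rows : Int := -(PySem.Int.floordiv (-n) columns)
    (PySem.List.pyRange 0 rows).flatMap (fun r =>
      (PySem.List.pyRange 0 columns).map (fun c =>
        if c * rows + r < n then (PySem.List.pyGet? items (c * rows + r)).getD "" else ""))

-- ===== PRECONDITION & SPEC =====
def Spec_to_column_major (items : List String) (columns : Int) (out : List String) : Prop := out = to_column_major_alt items columns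
instance (items : List String) (columns : Int) (out : List String) : Decidable (Spec_to_column_major items columns out) := by unfold Spec_to_column_major; infer_instance

-- ===== CLAIM (what is proved, stated in full; the proofs are below) =====
def Claim_equal_to_column_major : Prop := ∀ (items : List String) (columns : Int), Dom_to_column_major items columns → Spec_to_column_major items columns (to_column_major items columns)

-- ===== LEMMAS AND PROOFS =====

-- the grid after the first m cells (in column-major fill order) have been written
def mkGrid (items : List String) (R C m : Nat) : List (List (Option String)) :=
  (List.range R).map (fun r => (List.range C).map (fun c =>
    if c * R + r < m then some (items.getD (c * R + r) "") else none))

theorem idx_inj {R r r' c c' : Nat} (hR : 0 < R) (hr : r < R) (hr' : r' < R)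
    (h : c' * R + r' = c * R + r) : c' = c ∧ r' = r := by
  have e1 : (c' * R + r') % R = r' := by
    rw [Nat.add_comm, Nat.add_mul_mod_self_right, Nat.mod_eq_of_lt hr']
  have e2 : (c * R + r) % R = r := by
    rw [Nat.add_comm, Nat.add_mul_mod_self_right, Nat.mod_eq_of_lt hr]
  have hrr : r' = r := by rw [← e1, ← e2, h]
  subst hrr
  have hcc : c' * R = c * R := by omega
  exact ⟨Nat.eq_of_mul_eq_mul_right hR hcc, rfl⟩

theorem gridSet_mkGrid (items : List String) (R C r c : Nat)
    (hr : r < R) (hlt : c * R + r < items.length) :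
    gridSet (mkGrid items R C (c * R + r)) r c (some (items.getD (c * R + r) ""))
      = mkGrid items R C (c * R + r + 1) := by
  have hR : 0 < R := by omega
  unfold gridSet mkGrid
  have hrowget : ((List.range R).map (fun r' => (List.range C).map (fun c' =>
      if c' * R + r' < c * R + r then some (items.getD (c' * R + r') "") else none))).getD r []
      = (List.range C).map (fun c' =>
          if c' * R + r < c * R + r then some (items.getD (c' * R + r) "") else none) := by
    rw [List.getD_eq_getElem?_getD, List.getElem?_map, List.getElem?_range hr]
    rfl
  rw [hrowget]
  apply List.ext_getElem (by simp)
  intro i hi hi'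
  simp only [List.length_set, List.length_map, List.length_range] at hi hi'
  simp only [List.getElem_set, List.getElem_map, List.getElem_range]
  by_cases hir : r = i
  · subst hir
    rw [if_pos rfl]
    apply List.ext_getElem (by simp)
    intro j hj hj'
    simp only [List.length_set, List.length_map, List.length_range] at hj hj'
    simp only [List.getElem_set, List.getElem_map, List.getElem_range]
    by_cases hjc : c = j
    · subst hjc
      rw [if_pos rfl, if_pos (by omega)]
    · rw [if_neg hjc]
      by_cases hlt2 : j * R + r < c * R + r
      · rw [if_pos hlt2, if_pos (by omega)]
      · rw [if_neg hlt2, if_neg ?_]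
        intro hcon
        have heq : j * R + r = c * R + r := by omega
        exact hjc (idx_inj hR hr hr heq).1.symm
  · rw [if_neg hir]
    apply List.map_congr_left
    intro c' _
    by_cases hlt2 : c' * R + i < c * R + r
    · rw [if_pos hlt2, if_pos (by omega)]
    · rw [if_neg hlt2, if_neg ?_]
      intro hcon
      have heq : c' * R + i = c * R + r := by omega
      exact hir (idx_inj hR hr hi heq).2.symm

-- one inner-loop step, as a transition on the invariant state
theorem fill_step (items : List String) (R C r c : Nat) (hr : r < R) :
    (if min (c * R + r) items.length < items.length then
        (gridSet (mkGrid items R C (min (c * R + r) items.length)) r c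
          (some (items.getD (min (c * R + r) items.length) "")), min (c * R + r) items.length + 1)
      else (mkGrid items R C (min (c * R + r) items.length), min (c * R + r) items.length))
    = (mkGrid items R C (min (c * R + r + 1) items.length), min (c * R + r + 1) items.length) := by
  by_cases h : c * R + r < items.length
  · rw [if_pos (by omega)]
    rw [Nat.min_eq_left (by omega), Nat.min_eq_left (by omega)]
    rw [gridSet_mkGrid items R C r c hr h]
  · rw [if_neg (by omega), Nat.min_eq_right (by omega), Nat.min_eq_right (by omega)]

-- the inner loop over rows, on a suffix of range R
theorem inner_fold (items : List String) (R C c : Nat) (_hc : c < C) :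
    ∀ (k r0 : Nat), r0 + k = R →
    (List.range' r0 k).foldl
      (fun (st : List (List (Option String)) × Nat) (r : Nat) =>
        if st.2 < items.length then
          (gridSet st.1 r c (some (items.getD st.2 "")), st.2 + 1)
        else st)
      (mkGrid items R C (min (c * R + r0) items.length), min (c * R + r0) items.length)
    = (mkGrid items R C (min (c * R + R) items.length), min (c * R + R) items.length) := by
  intro k
  induction k with
  | zero => intro r0 h; subst h; simp
  | succ k ih =>
    intro r0 h
    rw [List.range'_succ, List.foldl_cons]
    have hr : r0 < R := by omega
    have hstep := fill_step items R C r0 c hr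
    simp only at hstep ⊢
    rw [hstep]
    have := ih (r0 + 1) (by omega)
    rw [show c * R + r0 + 1 = c * R + (r0 + 1) by omega]
    exact this

-- the outer loop over columns, on a suffix of range C
theorem outer_fold (items : List String) (R C : Nat) :
    ∀ (k c0 : Nat), c0 + k = C →
    (List.range' c0 k).foldl
      (fun (st : List (List (Option String)) × Nat) (c : Nat) =>
        (List.range R).foldl
          (fun (st : List (List (Option String)) × Nat) (r : Nat) =>
            if st.2 < items.length then
              (gridSet st.1 r c (some (items.getD st.2 "")), st.2 + 1)
            else st) st)
      (mkGrid items R C (min (c0 * R) items.length), min (c0 * R) items.length)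
    = (mkGrid items R C (min (C * R) items.length), min (C * R) items.length) := by
  intro k
  induction k with
  | zero => intro c0 h; subst h; simp
  | succ k ih =>
    intro c0 h
    rw [List.range'_succ, List.foldl_cons]
    have hc : c0 < C := by omega
    have hinner := inner_fold items R C c0 hc R 0 (by omega)
    simp only [Nat.add_zero, ← List.range_eq_range'] at hinner
    rw [hinner]
    have htail := ih (c0 + 1) (by omega)
    rw [show c0 * R + R = (c0 + 1) * R by ring]
    rw [show (c0 + 1) * R = (c0 + 1) * R from rfl] at htail
    exact htail

-- rows = ceil(n / C) as a Nat, via the ceiling-division bracket lemma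
theorem rows_eq (n C : Nat) (hC : 0 < C) :
    -(PySem.Int.floordiv (-(n : Int)) (C : Int)) = (((n + C - 1) / C : Nat) : Int) := by
  rw [PySem.Int.neg_floordiv_neg_eq_iff_of_pos (by exact_mod_cast hC)]
  set q := (n + C - 1) / C with hq
  have h := Nat.div_add_mod (n + C - 1) C
  have hm := Nat.mod_lt (n + C - 1) hC
  rw [← hq] at h
  obtain ⟨P, hP⟩ : ∃ P, P = C * q := ⟨_, rfl⟩
  rw [← hP] at h
  have hPc : (P : Int) = (C : Int) * (q : Int) := by exact_mod_cast hP
  have h1c : (n : Int) ≤ (P : Int) := by exact_mod_cast (show n ≤ P by omega)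
  have h2c : (P : Int) + 1 ≤ (n : Int) + (C : Int) := by
    exact_mod_cast (show P + 1 ≤ n + C by omega)
  constructor
  · nlinarith [hPc, h2c]
  · nlinarith [hPc, h1c]

theorem ceil_mul_ge (n C : Nat) (hC : 0 < C) : n ≤ C * ((n + C - 1) / C) := by
  have h := Nat.div_add_mod (n + C - 1) C
  have hm := Nat.mod_lt (n + C - 1) hC
  omega

-- ===== VERDICT (by name: the statement is the Claim_ definition above) =====
theorem to_column_major_spec : Claim_equal_to_column_major := by
  intro items columns _
  unfold Spec_to_column_major to_column_major to_column_major_alt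
  by_cases hg : items = [] ∨ columns ≤ 0
  · rw [if_pos hg, if_pos hg]
  · rw [if_neg hg, if_neg hg]
    simp only [not_or, not_le] at hg
    obtain ⟨hne, hpos⟩ := hg
    have hn1 : 0 < items.length := List.length_pos_iff.mpr hne
    set n := items.length with hn
    set C := columns.toNat with hCdef
    have hC : 0 < C := by simp only [hCdef]; omega
    have hcols : columns = (C : Int) := by omega
    set R := (n + C - 1) / C with hRdef
    have hR : 0 < R := by rw [hRdef]; exact Nat.div_pos (by omega) hC
    have hrows : -(PySem.Int.floordiv (-(n : Int)) ((C : Int))) = (R : Int) := by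
      rw [hRdef]; exact rows_eq n C hC
    have hnRC : n ≤ C * R := by rw [hRdef]; exact ceil_mul_ge n C hC
    simp only [hcols]
    simp only [hrows]
    simp only [PySem.List.pyRange_zero_natCast]
    simp only [List.foldl_map, List.flatMap_map, List.map_map, Function.comp_def,
      Int.toNat_natCast]
    have hgrid0 : (List.map (fun (_ : Nat) => List.replicate C (none : Option String)) (List.range R))
        = mkGrid items R C 0 := by
      unfold mkGrid
      apply List.map_congr_left
      intro r _
      simp
    rw [hgrid0]
    have houter := outer_fold items R C C 0 (by omega)
    simp only [Nat.zero_mul, Nat.min_eq_left (Nat.zero_le n), ← hn] at houter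
    rw [Nat.min_eq_right hnRC, ← List.range_eq_range'] at houter
    rw [houter]
    simp only [PySem.List.foldl_append_singleton_eq_map]
    rw [PySem.List.foldl_append_eq_flatMap (fun row => List.map (fun item => Option.getD item "") row)]
    unfold mkGrid
    simp only [List.nil_append, List.flatMap_map, List.map_map, Function.comp_def]
    congr 1
    funext r
    apply List.map_congr_left
    intro c hcmem
    have hcast : ((c : Int) * (R : Int) + (r : Int)) = ((c * R + r : Nat) : Int) := by push_cast; ring
    rw [hcast, PySem.List.pyGet?_natCast]
    by_cases hidx : c * R + r < n
    · rw [if_pos hidx, if_pos (by exact_mod_cast hidx)]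
      simp only [Option.getD_some]
      rw [List.getD_eq_getElem?_getD]
    · rw [if_neg hidx, if_neg (by exact_mod_cast hidx)]
      rfl
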